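-- pv_equiv track=rewrite | github.com/michaelaredman/adventofcode2023 | day14pt2.py | roll_west
-- ===== SOURCE A (Python) =====
-- def roll_west(grid: list[list[str]]) -> list[list[str]]:
--     n_row, n_col = len(grid), len(grid[0])
--     for r in range(n_row):
--         spaces = 0
--         insert_p = None
--         for c in range(n_col):
--             match grid[r][c]:
--                 case '#':
--                     spaces, insert_p = 0, None
--                 case '.':
--                     spaces += 1
--                     if insert_p == None:
--                         insert_p = c
--                 case 'O':
--                     if spaces:
--                         grid[r][c], grid[r][insert_p] = '.', 'O'
--                         insert_p += 1
--                     else: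
--                         spaces, insert_p = 0, None
--                 case _:
--                     assert False
--     return grid
-- ===== SOURCE B (Python) =====
-- def roll_west(grid: list[list[str]]) -> list[list[str]]:
--     rank = {'O': 0, '.': 1}
--     for row in grid:
--         segs = [[]]
--         for cell in row:
--             if cell == '#':
--                 segs.append([])
--             else:
--                 segs[-1].append(cell)
--         out = sorted(segs[0], key=rank.__getitem__)
--         for seg in segs[1:]:
--             out += ['#'] + sorted(seg, key=rank.__getitem__)
--         row[:] = out
--     return grid
-- ===== Notes on version B (the rewrite author's own statement) =====
-- stated objective: simpler
-- what changed: B splits each row at '#' into segments and stably sorts each segment by a rank dict (O before .), replacing A's stateful spaces/insert_p scan with in-place swaps.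
-- outside the precondition, e.g. on roll_west([['.'], ['.', 'O']]): A returns [['.'], ['.', 'O']], B returns [['.'], ['O', '.']]; on roll_west([['.', 'O'], ['.']]): A raises IndexError, B returns [['O', '.'], ['.']]; on roll_west([['x']]): A raises AssertionError, B raises KeyError
import Mathlib
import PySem

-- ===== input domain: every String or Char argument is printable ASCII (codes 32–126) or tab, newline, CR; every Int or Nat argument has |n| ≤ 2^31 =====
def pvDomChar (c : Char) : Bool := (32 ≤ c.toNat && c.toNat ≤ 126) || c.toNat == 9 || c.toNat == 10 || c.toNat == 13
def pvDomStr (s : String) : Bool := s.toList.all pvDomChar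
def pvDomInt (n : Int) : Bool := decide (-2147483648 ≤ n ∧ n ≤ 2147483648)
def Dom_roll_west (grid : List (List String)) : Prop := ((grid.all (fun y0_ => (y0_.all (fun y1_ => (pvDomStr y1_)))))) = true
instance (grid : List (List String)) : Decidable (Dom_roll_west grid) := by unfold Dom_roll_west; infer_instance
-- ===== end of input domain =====

-- B rewrites each '#'-delimited row segment as its O-count of 'O's followed by dots,
-- replacing A's stateful spaces/insert_p scan with swaps (a simpler decomposition; same cost).
-- Both Pythons mutate the grid's rows in place and return the same object; the theorems
-- here are about the returned value.

-- ===== PORT A =====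
-- one step of A's inner loop at column c; state = (row, spaces, insert_p)
def pvStepA (st : List String × Nat × Option Nat) (c : Nat) : List String × Nat × Option Nat :=
  let row := st.1
  let spaces := st.2.1
  let ip := st.2.2
  let cell := row.getD c ""          -- Pre_ keeps c in range
  if cell = "#" then (row, 0, none)
  else if cell = "." then (row, spaces + 1, if ip.isNone then some c else ip)
  else if cell = "O" then
    if spaces ≠ 0 then
      match ip with
      | some i => ((row.set c ".").set i "O", spaces, some (i + 1))
      | none => (row, spaces, none)  -- unreachable: spaces ≠ 0 only with insert_p set
    else (row, 0, none)
  else (row, spaces, ip)             -- Python: assert False (excluded by Pre_)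

def pvRowA (row : List String) (nCol : Nat) : List String :=
  ((List.range nCol).foldl pvStepA (row, 0, none)).1

def roll_west (grid : List (List String)) : List (List String) :=
  let nCol := (grid.headD []).length
  grid.map (fun row => pvRowA row nCol)

-- ===== PORT B =====
-- rank = {'O': 0, '.': 1}; rank[c] raises KeyError on any other cell (Python B raises there,
-- so the default 0 below is never compared against Python)
def pvRank (c : String) : Nat := if c = "." then 1 else 0

-- hand port of Source B's segs loop (split the row at '#' cells)
def pvSplitHash : List String → List (List String)
  | [] => [[]]
  | s :: tl =>
      if s = "#" then [] :: pvSplitHash tl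
      else
        match pvSplitHash tl with
        | [] => [[s]]                -- unreachable: pvSplitHash never returns []
        | seg :: rest => (s :: seg) :: rest

-- sorted(seg, key=rank.__getitem__): stable sort, 'O' (rank 0) before '.' (rank 1)
def pvSortB (seg : List String) : List String := PySem.List.sorted seg pvRank false

-- hand port of Source B's out accumulation: first segment, then '#' before each later one
def pvJoinHash : List (List String) → List String
  | [] => []
  | [seg] => seg
  | seg :: rest => seg ++ "#" :: pvJoinHash rest

def roll_west_alt (grid : List (List String)) : List (List String) :=
  grid.map (fun row => pvJoinHash ((pvSplitHash row).map pvSortB))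

-- ===== PRECONDITION & SPEC =====
-- Pre_ restricts to non-empty rectangular grids of single-character '#'/'.'/'O' cells — the
-- natural domain: elsewhere A raises (IndexError on the empty grid or on a row shorter than
-- the first, AssertionError on any other cell) or, on a ragged row longer than the first,
-- silently rolls only its first len(grid[0]) cells, an artefact of its n_col bookkeeping.
def Pre_roll_west (grid : List (List String)) : Prop :=
  grid ≠ [] ∧ ∀ row ∈ grid, row.length = (grid.headD []).length ∧
    ∀ s ∈ row, s = "#" ∨ s = "." ∨ s = "O"
instance (grid : List (List String)) : Decidable (Pre_roll_west grid) := by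
  unfold Pre_roll_west; infer_instance

def pvWitness_roll_west : List (List String) :=
  [[".", "O", "#", ".", "O"], ["O", ".", ".", "O", "."]]

def Spec_roll_west (grid : List (List String)) (out : List (List String)) : Prop := out = roll_west_alt grid
instance (grid : List (List String)) (out : List (List String)) : Decidable (Spec_roll_west grid out) := by unfold Spec_roll_west; infer_instance

-- ===== CLAIM (what is proved, stated in full; the proofs are below) =====
def Claim_equal_roll_west : Prop := ∀ (grid : List (List String)), Dom_roll_west grid → Pre_roll_west grid → Spec_roll_west grid (roll_west grid)

-- ===== LEMMAS AND PROOFS =====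

-- proof-side normal form of a sorted '#'-free segment
def pvSegB (seg : List String) : List String :=
  let k := seg.count "O"
  List.replicate k "O" ++ List.replicate (seg.length - k) "."

lemma pvGetD_mid (pre mid suf : List String) (x s : String) :
    (pre ++ (mid ++ x :: suf)).getD (pre.length + mid.length) s = x := by
  simp [List.getD]

lemma pvSet_mid (pre mid suf : List String) (x a : String) :
    (pre ++ (mid ++ x :: suf)).set (pre.length + mid.length) a = pre ++ (mid ++ a :: suf) := by
  simp

lemma pvCount_add (seg : List String) (h : ∀ s ∈ seg, s = "." ∨ s = "O") :
    seg.count "." + seg.count "O" = seg.length := by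
  induction seg with
  | nil => simp
  | cons a tl ih =>
      have htl := ih (fun s hs => h s (by simp [hs]))
      rcases h a (by simp) with rfl | rfl <;> simp <;> omega

lemma pvSegB_eq (seg : List String) (h : ∀ s ∈ seg, s = "." ∨ s = "O") :
    pvSegB seg = List.replicate (seg.count "O") "O" ++ List.replicate (seg.count ".") "." := by
  have h1 := pvCount_add seg h
  have h2 := List.count_le_length (l := seg) (a := "O")
  simp only [pvSegB]
  rw [show seg.length - seg.count "O" = seg.count "." by omega]

lemma pvSegB_len (seg : List String) : (pvSegB seg).length = seg.length := by
  have := List.count_le_length (l := seg) (a := "O")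
  simp only [pvSegB, List.length_append, List.length_replicate]
  omega

lemma pvSorted_shape (ys : List String) (h : ∀ s ∈ ys, s = "." ∨ s = "O")
    (hp : ys.Pairwise (fun a b => pvRank a ≤ pvRank b)) :
    ys = List.replicate (ys.count "O") "O" ++ List.replicate (ys.count ".") "." := by
  induction ys with
  | nil => simp
  | cons a tl ih =>
      rw [List.pairwise_cons] at hp
      obtain ⟨ha, htl⟩ := hp
      rcases h a (by simp) with rfl | rfl
      · have hall : ∀ b ∈ tl, b = "." := by
          intro b hb
          rcases h b (by simp [hb]) with rfl | rfl
          · rfl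
          · have := ha "O" hb; simp [pvRank] at this
        rw [List.eq_replicate_of_mem hall]
        simp [List.replicate_succ, List.count_replicate]
      · rw [ih (fun s hs => h s (by simp [hs])) htl]
        simp [List.replicate_succ, List.count_append, List.count_replicate]

lemma pvSortB_eq (seg : List String) (h : ∀ s ∈ seg, s = "." ∨ s = "O") :
    pvSortB seg = pvSegB seg := by
  have hperm : (PySem.List.sorted seg pvRank false).Perm seg := PySem.List.sorted_perm seg pvRank false
  have hmem : ∀ s ∈ pvSortB seg, s = "." ∨ s = "O" := by
    intro s hs
    exact h s (hperm.mem_iff.mp hs)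
  have hshape := pvSorted_shape (pvSortB seg) hmem (PySem.List.sorted_pairwise seg pvRank)
  have hcnt := pvCount_add seg h
  rw [pvSortB] at hshape ⊢
  rw [hshape, List.Perm.count_eq hperm, List.Perm.count_eq hperm]
  simp only [pvSegB]
  rw [show seg.length - seg.count "O" = seg.count "." by omega]

-- the inner-loop invariant of A over one '#'-free segment
lemma pvSegLoop (seg : List String) (h : ∀ s ∈ seg, s = "." ∨ s = "O")
    (pre suf : List String) :
    (List.range seg.length).foldl (fun st j => pvStepA st (pre.length + j))
        (pre ++ (seg ++ suf), 0, none)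
      = (pre ++ (pvSegB seg ++ suf), seg.count ".",
         if seg.count "." = 0 then none else some (pre.length + seg.count "O")) := by
  induction seg using List.reverseRecOn generalizing suf with
  | nil => simp [pvSegB]
  | append_singleton seg x ih =>
      have hseg : ∀ s ∈ seg, s = "." ∨ s = "O" := fun s hs => h s (by simp [hs])
      have hcnt := pvCount_add seg hseg
      have hx := h x (by simp)
      rw [show (seg ++ [x]).length = seg.length + 1 by simp, List.range_succ,
        List.foldl_append,
        show pre ++ ((seg ++ [x]) ++ suf) = pre ++ (seg ++ (x :: suf)) by simp,
        ih hseg (x :: suf), List.foldl_cons, List.foldl_nil, pvSegB_eq seg hseg]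
      set k := seg.count "O" with hk
      set d := seg.count "." with hd
      clear_value k d
      have hmid : (List.replicate k "O" ++ List.replicate (d : Nat) (".":String)).length = seg.length := by
        simp; omega
      have hget := pvGetD_mid pre (List.replicate k "O" ++ List.replicate d ".") suf x ""
      rw [hmid] at hget
      rcases hx with rfl | rfl
      · -- x = "."
        simp only [pvStepA, hget]
        rw [pvSegB_eq (seg ++ ["."]) h]
        simp only [List.count_append, List.count_cons, List.count_nil, ← hk, ← hd]
        by_cases hd0 : d = 0 <;>
          simp [hd0, List.replicate_succ', List.append_assoc] <;> omega
      · -- x = "O"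
        simp only [pvStepA, hget]
        rw [pvSegB_eq (seg ++ ["O"]) h]
        simp only [List.count_append, List.count_cons, List.count_nil, ← hk, ← hd]
        by_cases hd0 : d = 0
        · simp [hd0, List.replicate_succ']
        · have hset1 := pvSet_mid pre (List.replicate k "O" ++ List.replicate d ".") suf "O" "."
          rw [hmid] at hset1
          obtain ⟨d', rfl⟩ : ∃ d', d = d' + 1 := ⟨d - 1, by omega⟩
          have hassoc : (List.replicate k "O" ++ List.replicate (d'+1) (".":String)) ++ "." :: suf
              = List.replicate k "O" ++ ("." :: (List.replicate d' "." ++ "." :: suf)) := by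
            simp [List.replicate_succ]
          have hset2 := pvSet_mid pre (List.replicate k "O") (List.replicate d' "." ++ "." :: suf) "." "O"
          rw [List.length_replicate] at hset2
          have hrow : List.replicate k "O" ++ ("O" :: (List.replicate d' "." ++ "." :: suf))
              = (List.replicate (k+1) "O" ++ List.replicate (d'+1) ".") ++ suf := by
            simp [List.replicate_succ', List.append_assoc]
          simp only [hd0, hset1, hassoc]
          simp [hrow, Nat.add_assoc]

lemma pvSplitHash_ne_nil (l : List String) : pvSplitHash l ≠ [] := by
  induction l with
  | nil => simp [pvSplitHash]
  | cons s tl ih =>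
      by_cases hs : s = "#" <;> simp [pvSplitHash, hs]
      cases hsp : pvSplitHash tl <;> simp

lemma pvSplitHash_no_hash (l : List String) (h : "#" ∉ l) : pvSplitHash l = [l] := by
  induction l with
  | nil => rfl
  | cons s tl ih =>
      have hs : ¬ s = "#" := fun e => h (by simp [e])
      simp only [pvSplitHash, if_neg hs, ih (fun e => h (by simp [e]))]

lemma pvSplitHash_append (seg rest : List String) (h : "#" ∉ seg) :
    pvSplitHash (seg ++ "#" :: rest) = seg :: pvSplitHash rest := by
  induction seg with
  | nil => simp [pvSplitHash]
  | cons s tl ih =>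
      have hs : ¬ s = "#" := fun e => h (by simp [e])
      simp only [List.cons_append, pvSplitHash, hs, if_false,
        ih (fun e => h (by simp [e]))]

lemma pvJoinHash_cons (x : List String) (l : List (List String)) (h : l ≠ []) :
    pvJoinHash (x :: l) = x ++ "#" :: pvJoinHash l := by
  cases l with
  | nil => exact absurd rfl h
  | cons b tl => rfl

lemma pvDropWhile_head (p : String → Bool) (l : List String) (y : String) (tl : List String)
    (h : List.dropWhile p l = y :: tl) : p y = false := by
  induction l with
  | nil => simp [List.dropWhile] at h
  | cons a l ih =>
      by_cases hpa : p a
      · rw [List.dropWhile_cons_of_pos hpa] at h; exact ih h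
      · rw [List.dropWhile_cons_of_neg hpa] at h
        cases h
        simpa using hpa

lemma pvRowLoop (n : Nat) (row pre : List String) (hn : row.length ≤ n)
    (h : ∀ s ∈ row, s = "#" ∨ s = "." ∨ s = "O") :
    ((List.range row.length).foldl (fun st j => pvStepA st (pre.length + j))
        (pre ++ row, 0, none)).1
      = pre ++ pvJoinHash ((pvSplitHash row).map pvSortB) := by
  induction n generalizing row pre with
  | zero =>
      have hrow : row = [] := List.eq_nil_of_length_eq_zero (by omega)
      subst hrow
      simp [pvSplitHash, pvJoinHash, pvSortB, PySem.List.sorted]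
  | succ n ih =>
      by_cases hmem : "#" ∈ row
      · have hdecomp := (List.takeWhile_append_dropWhile
          (p := fun s => !(s == "#")) (l := row)).symm
        set seg := row.takeWhile (fun s => !(s == "#")) with hsegdef
        have hnh : "#" ∉ seg := by
          intro hin
          have := List.mem_takeWhile_imp hin
          simp at this
        cases hdw : row.dropWhile (fun s => !(s == "#")) with
        | nil =>
            exfalso
            rw [hdw, List.append_nil] at hdecomp
            exact hnh (hdecomp ▸ hmem)
        | cons y tl =>
            have hy : y = "#" := by
              have := pvDropWhile_head _ _ _ _ hdw
              simpa using this
            subst hy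
            rw [hdw] at hdecomp
            have hvrow : ∀ s ∈ seg ++ "#" :: tl, s = "#" ∨ s = "." ∨ s = "O" := by
              rw [← hdecomp]; exact h
            have hvseg : ∀ s ∈ seg, s = "." ∨ s = "O" := by
              intro s hs
              rcases hvrow s (by simp [hs]) with rfl | hs' | hs'
              · exact absurd hs hnh
              · exact Or.inl hs'
              · exact Or.inr hs'
            have hvtl : ∀ s ∈ tl, s = "#" ∨ s = "." ∨ s = "O" := by
              intro s hs; exact hvrow s (by simp [hs])
            have hlen : (seg ++ "#" :: tl).length = seg.length + (1 + tl.length) := by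
              simp; omega
            have htln : tl.length ≤ n := by
              have := hn
              rw [hdecomp, hlen] at this
              omega
            rw [hdecomp, hlen]
            simp only [List.range_add, List.foldl_append, List.foldl_map, List.range_one,
              List.foldl_cons, List.foldl_nil]
            rw [pvSegLoop seg hvseg pre ("#" :: tl)]
            have hget := pvGetD_mid pre (pvSegB seg) tl "#" ""
            rw [pvSegB_len] at hget
            have hstep : pvStepA (pre ++ (pvSegB seg ++ "#" :: tl), seg.count ".",
                if seg.count "." = 0 then none else some (pre.length + seg.count "O"))
                (pre.length + (seg.length + 0))
                = (pre ++ (pvSegB seg ++ "#" :: tl), 0, none) := by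
              simp only [pvStepA, Nat.add_zero, hget]
              simp
            rw [hstep]
            have hfn : (fun (st : List String × ℕ × Option ℕ) (j : ℕ) =>
                  pvStepA st (pre.length + (seg.length + (1 + j))))
                = (fun st j => pvStepA st ((pre ++ (pvSegB seg ++ ["#"])).length + j)) := by
              funext st j
              congr 1
              simp [pvSegB_len]
              omega
            have hrw : pre ++ (pvSegB seg ++ "#" :: tl) = (pre ++ (pvSegB seg ++ ["#"])) ++ tl := by
              simp
            rw [hfn, hrw, ih tl (pre ++ (pvSegB seg ++ ["#"])) htln hvtl]
            rw [pvSplitHash_append seg tl hnh]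
            rw [List.map_cons,
              pvJoinHash_cons _ _ (by simp [pvSplitHash_ne_nil]),
              pvSortB_eq seg hvseg]
            simp
      · have hvseg : ∀ s ∈ row, s = "." ∨ s = "O" := by
          intro s hs
          rcases h s hs with rfl | hs' | hs'
          · exact absurd hs hmem
          · exact Or.inl hs'
          · exact Or.inr hs'
        have hsl := pvSegLoop row hvseg pre []
        rw [List.append_nil] at hsl
        rw [hsl, pvSplitHash_no_hash row hmem]
        simp [pvJoinHash, pvSortB_eq row hvseg]


lemma pvRowEquiv (row : List String) (h : ∀ s ∈ row, s = "#" ∨ s = "." ∨ s = "O") :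
    pvRowA row row.length = pvJoinHash ((pvSplitHash row).map pvSortB) := by
  have h0 := pvRowLoop row.length row [] le_rfl h
  simp only [List.nil_append, List.length_nil, Nat.zero_add] at h0
  exact h0

-- ===== VERDICT (by name: the statement is the Claim_ definition above) =====
theorem roll_west_spec : Claim_equal_roll_west := by
  intro grid _ hpre
  obtain ⟨-, hrows⟩ := hpre
  unfold Spec_roll_west roll_west roll_west_alt
  refine List.map_congr_left (fun row hrow => ?_)
  obtain ⟨hlen, hcells⟩ := hrows row hrow
  rw [← hlen]
  exact pvRowEquiv row hcells
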